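/- GENERATED by mk_final_copies.py from the proof of the farm's unit `inverse_mdct.7a` (farm:inverse_mdct.7a.1: Lemmas.lean) as the
   re-elaboration sweep compiled it — do not edit. -/
import Asan.CheckWalk
import Vorbis.Spec.MdctUse
import Vorbis.Spec.Units.inverse_mdct_7a

open X86 X86.User Asan Vorbis Vorbis.Spec

set_option maxRecDepth 4000
set_option maxHeartbeats 4000000

namespace Vorbis.Spec.inverse_mdct_7a

/-! ### The internal loop invariants of segment 7a (`Frame7`, `AtCut19`: Vorbis/Spec/MdctTop7.lean) -/

/-- **At the head of the second `l` loop** (`loop7`, 0x1098f2, line 2785) with `edi = l`, `lmid k ≤ l ≤ max (lmid k) (k − 6)`. -/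
structure AtOuter (u₀ : State) (others : List Obj) (frames : List (Nat × FrameLayout)) (len : Nat) (A : Arena)
    (stored room : Int) (ysz : Nat → Nat) (k c : Nat) (ue : State) (ret : Word) (l : Nat) (v : State) : Prop where
  rip : v.rip = Vorbis.L.inverse_mdct.loop7
  frame : inverse_mdct.Frame7 u₀ others frames len A stored room ysz k c ue ret v
  /-- `edi = l` (the upper half of rdi is 0) -/
  rdi : (v.reg .rdi).toNat = l
  /-- the loop starts at `lmid k` -/
  lo : Mdct.lmid k ≤ l
  /-- … and is left at `k − 6` at the latest -/
  hi : l ≤ max (Mdct.lmid k) (k - 6)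

/-- **At the head of the `r` loop** (`loop6`, 0x1098eb, line 2792) of round `l` after `t` rounds: `ebx = rlim − t`, `r13 = A0 = A +
16·k1·t` bytes, `r12d = i_off = n2 − 1 − 8 t`, `r14d = k0`, `r15d = k0_2`, `d[rbp−58H] = k1`, `d[rbp−5CH] = lim`, the BYTE
`[rbp−48H] = l + 3`, `d[rbp−70H] = l + 1`. -/
structure im7a_AtInner (u₀ : State) (others : List Obj) (frames : List (Nat × FrameLayout)) (len : Nat) (A : Arena)
    (stored room : Int) (ysz : Nat → Nat) (k c : Nat) (ue : State) (ret : Word) (l t : Nat) (v : State) : Prop where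
  rip : v.rip = Vorbis.L.inverse_mdct.loop6
  frame : inverse_mdct.Frame7 u₀ others frames len A stored room ysz k c ue ret v
  /-- the guard of the second `l` loop holds at `l` -/
  inl : Mdct.InSecond k l
  /-- at most `rlim` rounds are done -/
  le : t ≤ Mdct.rlim (inverse_mdct.n ue) l
  rbx : (v.reg .rbx).toNat = Mdct.rlim (inverse_mdct.n ue) l - t
  r13 : (v.reg .r13).toNat = inverse_mdct.tabA ue + 4 * (4 * Mdct.k1 l * t)
  r12 : (v.reg .r12).toNat = inverse_mdct.n ue / 2 - 1 - 8 * t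
  r14 : (v.reg .r14).toNat = Mdct.k0 (inverse_mdct.n ue) l
  r15 : (v.reg .r15).toNat = Mdct.k02 (inverse_mdct.n ue) l
  /-- `d[rbp − 58H] = k1` -/
  k1Slot : v.mem.readLE (ue.reg .rsp - 96) 4 = Mdct.k1 l
  /-- `d[rbp − 5CH] = lim` -/
  limSlot : v.mem.readLE (ue.reg .rsp - 100) 4 = Mdct.lim l
  /-- `d[rbp − 48H] = l + 3` (read as a byte by `movzx ecx, BYTE PTR [rbp-0x48]`) -/
  l3Slot : v.mem.readLE (ue.reg .rsp - 80) 4 = l + 3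
  /-- `d[rbp − 70H] = l + 1` -/
  l1Slot : v.mem.readLE (ue.reg .rsp - 120) 4 = l + 1

/-! ### What the callees' preconditions need of the function's `Body` -/

section BodyFacts
variable {u₀ : State} {others : List Obj} {frames : List (Nat × FrameLayout)} {len : Nat} {A : Arena}
  {stored room : Int} {ysz : Nat → Nat} {k c : Nat} {ue : State} {ret : Word} {v : State}

/-- The shadow clause of a callee entered at `s` (its stack pointer below the steady one) when no shadow byte was written
since `v`: the live list is the function's with the temp block. -/
theorem shadowPre_callee (hb : inverse_mdct.Body u₀ others frames len A stored room ysz k c ue ret v) {s : State}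
    (hun : ShadowUntouched v.mem s.mem) (hle : (s.reg .rsp).toNat + 8 ≤ (ue.reg .rsp).toNat - 184)
    (h8 : (s.reg .rsp).toNat % 8 = 0) (hlo : 0x700000 ≤ (s.reg .rsp).toNat + 8) :
    ShadowPre (A.newTempObj (2 * inverse_mdct.n ue) :: others) frames s := by
  refine ⟨(hb.shadow.untouched hun).lower hle (by omega) hlo, ?_⟩
  intro o ho
  rcases List.mem_cons.mp ho with rfl | ho
  · have := hb.pre.arenaText
    unfold Arena.newTempObj Arena.tempObj
    simp only
    omega
  · exact hb.pre.shadow.offText o ho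

/-- The first `n / 2` floats of the sample buffer are live (with the temp block in the live list). -/
theorem live_buf (hp : inverse_mdct.Pre others frames len A stored room ysz k c ue) (o : Obj) :
    LiveBytes (o :: others) frames (inverse_mdct.buf ue) (4 * (inverse_mdct.n ue / 2)) := by
  have hnle := hp.n_le
  have hl := hp.blkLive o _ hp.buf_blk
  exact LiveBytes.of_block hl (Nat.le_refl _) (by simp only []; omega)

/-- The twiddle table `A` (`2 n` bytes) is live (with the temp block in the live list). -/
theorem live_tabA (hp : inverse_mdct.Pre others frames len A stored room ysz k c ue) (o : Obj) :
    LiveBytes (o :: others) frames (inverse_mdct.tabA ue) (2 * inverse_mdct.n ue) := by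
  have hl := hp.blkLive o _ hp.tabA_blk
  exact LiveBytes.of_block hl (Nat.le_refl _) (Nat.le_refl _)

end BodyFacts

/-! ### The bit-level terms of the walk, as numbers (closed facts: the six `(n, l)` of the second `l` loop) -/

/-- The six `(n, l)` for which the body of the second `l` loop runs (`Mdct.InSecond.cases`). -/
def Six (n l : Nat) : Prop :=
  (n = 1024 ∧ l = 3) ∨ (n = 2048 ∧ l = 4) ∨ (n = 4096 ∧ l = 4) ∨ (n = 4096 ∧ l = 5) ∨ (n = 8192 ∧ l = 5) ∨
      (n = 8192 ∧ l = 6)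

/-- A 32-bit load of a small number, as a number. -/
theorem toNat_ofBV_ofNat32 (x : Nat) (h : x < 2 ^ 32) : (Word.ofBV (BitVec.ofNat 32 x)).toNat = x := by
  rw [toNat_ofBV32, toNat_ofNat32 _ h]

/-- 0x1098fa `cmp eax, edi ; jle`: the signed test `ilog − 7 ≤ l` is `k − 6 ≤ l`. -/
theorem br_outer {k l : Nat} (h6 : 6 ≤ k) (h13 : k ≤ 13) (hl : l ≤ 7) :
    (BitVec.ofNat 32 (k + 1) - 7#32).toInt ≤ (Word.part Width.w32 (UInt64.ofNat l)).toInt ↔ k - 6 ≤ l := by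
  have hk : k = 6 ∨ k = 7 ∨ k = 8 ∨ k = 9 ∨ k = 10 ∨ k = 11 ∨ k = 12 ∨ k = 13 := by omega
  have hl' : l = 0 ∨ l = 1 ∨ l = 2 ∨ l = 3 ∨ l = 4 ∨ l = 5 ∨ l = 6 ∨ l = 7 := by omega
  rcases hk with rfl | rfl | rfl | rfl | rfl | rfl | rfl | rfl <;>
    rcases hl' with rfl | rfl | rfl | rfl | rfl | rfl | rfl | rfl <;> decide

/-- 0x109922 `sar eax, cl` with `cl = l + 6`: `rlim = n >> (l + 6)`. -/
theorem val_rlim {n l : Nat} (h : Six n l) :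
    (Word.ofBV ((BitVec.ofNat 32 n).sshiftRight
      ((BitVec.setWidth 8 (BitVec.setWidth 32 (UInt64.ofNat l + 6).toBitVec)).toNat % 32))).toNat = Mdct.rlim n l := by
  rcases h with ⟨rfl, rfl⟩ | ⟨rfl, rfl⟩ | ⟨rfl, rfl⟩ | ⟨rfl, rfl⟩ | ⟨rfl, rfl⟩ | ⟨rfl, rfl⟩ <;> decide

/-- 0x109904 `sar edx, cl` with `cl = l + 2`: `k0 = n >> (l + 2)`. -/
theorem val_k0 {n l : Nat} (h : Six n l) :
    (Word.ofBV ((BitVec.ofNat 32 n).sshiftRight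
      ((BitVec.setWidth 8 (BitVec.setWidth 32 (UInt64.ofNat l + 2).toBitVec)).toNat % 32))).toNat = Mdct.k0 n l := by
  rcases h with ⟨rfl, rfl⟩ | ⟨rfl, rfl⟩ | ⟨rfl, rfl⟩ | ⟨rfl, rfl⟩ | ⟨rfl, rfl⟩ | ⟨rfl, rfl⟩ <;> decide

/-- 0x10991c `sar r15d, 1`: `k0_2 = k0 >> 1`. -/
theorem val_k02 {n l : Nat} (h : Six n l) :
    (Word.ofBV (((BitVec.ofNat 32 n).sshiftRight
      ((BitVec.setWidth 8 (BitVec.setWidth 32 (UInt64.ofNat l + 2).toBitVec)).toNat % 32)).sshiftRight 1)).toNat =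
      Mdct.k02 n l := by
  rcases h with ⟨rfl, rfl⟩ | ⟨rfl, rfl⟩ | ⟨rfl, rfl⟩ | ⟨rfl, rfl⟩ | ⟨rfl, rfl⟩ | ⟨rfl, rfl⟩ <;> decide

/-- 0x109914 `shl ebx, cl` with `cl = l + 3`, stored to `d[rbp−58H]`: `k1 = 1 << (l + 3)`. -/
theorem val_k1 {n l : Nat} (h : Six n l) :
    (1#32 <<< ((BitVec.setWidth 8 (BitVec.setWidth 32 (UInt64.ofNat l + 3).toBitVec)).toNat % 32)).toNat % 4294967296 =
      Mdct.k1 l := by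
  rcases h with ⟨rfl, rfl⟩ | ⟨rfl, rfl⟩ | ⟨rfl, rfl⟩ | ⟨rfl, rfl⟩ | ⟨rfl, rfl⟩ | ⟨rfl, rfl⟩ <;> decide

/-- 0x10992b `shl r14d, cl` with `cl = l + 1`, stored to `d[rbp−5CH]`: `lim = 1 << (l + 1)`. -/
theorem val_lim {n l : Nat} (h : Six n l) :
    (1#32 <<< ((BitVec.setWidth 8 (Word.part Width.w32 (UInt64.ofNat l) + 1#32)).toNat % 32)).toNat % 4294967296 =
      Mdct.lim l := by
  rcases h with ⟨rfl, rfl⟩ | ⟨rfl, rfl⟩ | ⟨rfl, rfl⟩ | ⟨rfl, rfl⟩ | ⟨rfl, rfl⟩ | ⟨rfl, rfl⟩ <;> decide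

/-- 0x109906 `lea esi, [rdi + 3]`, stored to `d[rbp−48H]`: `l + 3`. -/
theorem val_l3 {n l : Nat} (h : Six n l) :
    (BitVec.setWidth 32 (UInt64.ofNat l + 3).toBitVec).toNat % 4294967296 = l + 3 := by
  rcases h with ⟨rfl, rfl⟩ | ⟨rfl, rfl⟩ | ⟨rfl, rfl⟩ | ⟨rfl, rfl⟩ | ⟨rfl, rfl⟩ | ⟨rfl, rfl⟩ <;> decide

/-- 0x109926 `add edi, 1`, stored to `d[rbp−70H]`: `l + 1`. -/
theorem val_l1 {n l : Nat} (h : Six n l) :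
    (Word.part Width.w32 (UInt64.ofNat l) + 1#32).toNat % 4294967296 = l + 1 := by
  rcases h with ⟨rfl, rfl⟩ | ⟨rfl, rfl⟩ | ⟨rfl, rfl⟩ | ⟨rfl, rfl⟩ | ⟨rfl, rfl⟩ | ⟨rfl, rfl⟩ <;> decide

/-- The low `k` bytes of a little-endian read of `k + j` bytes. -/
theorem readLE_low (f : Mem) (a : Word) (k j : Nat) : f.readLE a k = f.readLE a (k + j) % 256 ^ k := by
  induction k generalizing a with
  | zero =>
    rw [Nat.pow_zero, Nat.mod_one]
    rfl
  | succ k ih =>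
    have e : k + 1 + j = (k + j) + 1 := by omega
    rw [e]
    simp only [Mem.readLE]
    rw [ih (a + 1), Nat.pow_succ, Nat.mul_comm (256 ^ k) 256, Nat.mod_mul]
    have hb : (f.read a).toNat < 256 := UInt8.toNat_lt _
    have e1 : ((f.read a).toNat + 256 * f.readLE (a + 1) (k + j)) % 256 = (f.read a).toNat := by
      omega
    have e2 : ((f.read a).toNat + 256 * f.readLE (a + 1) (k + j)) / 256 = f.readLE (a + 1) (k + j) := by
      omega
    rw [e1, e2]

/-- A dword read of a qword just stored at the same address. -/
theorem readLE4_writeLE8 (f : Mem) (a : Word) (x : Nat) (hx : x < 2 ^ 32) : (f.writeLE a 8 x).readLE a 4 = x := by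
  rw [readLE_low _ a 4 4, Mem.readLE_writeLE_same _ _ _ _ (by decide)]
  omega

/-- The low byte of a dword slot. -/
theorem readLE1_of_readLE4 (f : Mem) (a : Word) (x : Nat) (h : f.readLE a 4 = x) (hx : x < 256) : f.readLE a 1 = x := by
  rw [readLE_low _ a 1 3, h]
  omega

/-- The low half of a register that holds a small number: the number, and not negative as an `int`. -/
theorem part32_small (x : Nat) (h : x < 2 ^ 31) :
    (Word.part Width.w32 (UInt64.ofNat x)).toNat = x ∧ (Word.part Width.w32 (UInt64.ofNat x)).msb = false := by
  have e : (Word.part Width.w32 (UInt64.ofNat x)).toNat = x := by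
    rw [toNat_part32, UInt64.toNat_ofNat']
    omega
  refine ⟨e, ?_⟩
  apply BitVec.msb_eq_false_iff_two_mul_lt.mpr
  rw [e]
  show 2 * x < 2 ^ 32
  omega

/-! ### The frame rule of a step of segment 7 -/

section Carry
variable {u₀ : State} {others : List Obj} {frames : List (Nat × FrameLayout)} {len : Nat} {A : Arena}
  {stored room : Int} {ysz : Nat → Nat} {k c : Nat} {ue : State} {ret : Word} {v w : State}

/-- The windows a step of segment 7 may write: the stack below the steady rsp (pushes, the callees' frames), the four dword
scratch slots `d[rbp−70H]`, `d[rbp−5CH]`, `d[rbp−58H]`, `d[rbp−48H]`, the sample buffer, the temp block. -/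
def im7a_stepWins (A : Arena) (ue : State) : List Span :=
  [⟨(ue.reg .rsp).toNat - 368, (ue.reg .rsp).toNat - 184⟩,
   ⟨(ue.reg .rsp).toNat - 120, (ue.reg .rsp).toNat - 116⟩,
   ⟨(ue.reg .rsp).toNat - 100, (ue.reg .rsp).toNat - 92⟩,
   ⟨(ue.reg .rsp).toNat - 80, (ue.reg .rsp).toNat - 76⟩,
   ⟨inverse_mdct.buf ue, inverse_mdct.buf ue + 4 * inverse_mdct.n ue⟩,
   ⟨inverse_mdct.tmp A ue, inverse_mdct.tmp A ue + 2 * inverse_mdct.n ue⟩]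

/-- The sample buffer and the temp block do not meet the stack region. -/
theorem data_off_stack (hp : inverse_mdct.Pre others frames len A stored room ysz k c ue) :
    (inverse_mdct.buf ue + 4 * inverse_mdct.n ue ≤ 0x700000 ∨ 0x800000 ≤ inverse_mdct.buf ue) ∧
    (inverse_mdct.tmp A ue + 2 * inverse_mdct.n ue ≤ 0x700000 ∨ 0x800000 ≤ inverse_mdct.tmp A ue) := by
  have hr := hp.tmp_range
  have hnle := hp.n_le
  have hoS := hp.offStack _ hp.buf_blk
  have h1x := hp.ado.ok.AR1x
  have h2 := hp.ado.ok.AR2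
  simp only [] at hoS
  omega

/-- **A slot of the frame that no step of segment 7 writes reads as before**: `[a, a + m)` lies in the frame above the steady
rsp and misses the four scratch dwords. -/
theorem slot_keep (hp : inverse_mdct.Pre others frames len A stored room ysz k c ue)
    (hroom : 7340032 + 368 ≤ (ue.reg .rsp).toNat) (htop : (ue.reg .rsp).toNat + 8 ≤ 8388608)
    {m1 m2 : Mem} (hs : Mem.SameExcept (im7a_stepWins A ue) m1 m2) (a : Word) (m : Nat)
    (hlo : (ue.reg .rsp).toNat - 184 ≤ a.toNat) (hhi : a.toNat + m ≤ (ue.reg .rsp).toNat + 8)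
    (h1 : a.toNat + m ≤ (ue.reg .rsp).toNat - 120 ∨ (ue.reg .rsp).toNat - 116 ≤ a.toNat)
    (h2 : a.toNat + m ≤ (ue.reg .rsp).toNat - 100 ∨ (ue.reg .rsp).toNat - 92 ≤ a.toNat)
    (h3 : a.toNat + m ≤ (ue.reg .rsp).toNat - 80 ∨ (ue.reg .rsp).toNat - 76 ≤ a.toNat) :
    m2.readLE a m = m1.readLE a m := by
  have hd := data_off_stack hp
  apply hs.readLE a m (by omega)
  intro x hx
  simp only [im7a_stepWins, List.mem_cons, List.mem_nil_iff, or_false] at hx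
  rcases hx with rfl | rfl | rfl | rfl | rfl | rfl <;> simp only [] <;> omega

/-- The same with the slot given as a distance `d` below the entry rsp: `[rsp − d, rsp − d + m)`. -/
theorem slot_keep_at (hp : inverse_mdct.Pre others frames len A stored room ysz k c ue)
    (hroom : 7340032 + 368 ≤ (ue.reg .rsp).toNat) (htop : (ue.reg .rsp).toNat + 8 ≤ 8388608)
    {m1 m2 : Mem} (hs : Mem.SameExcept (im7a_stepWins A ue) m1 m2) (a : Word) (d m : Nat)
    (ha : a.toNat = (ue.reg .rsp).toNat - d) (hd : d ≤ 184) (hm : m ≤ d + 8)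
    (h1 : 120 + m ≤ d ∨ d ≤ 116) (h2 : 100 + m ≤ d ∨ d ≤ 92) (h3 : 80 + m ≤ d ∨ d ≤ 76) :
    m2.readLE a m = m1.readLE a m := by
  apply slot_keep hp hroom htop hs a m <;> omega

/-- The windows of a step, as windows of the function's footprint (for `Body.carry`). -/
theorem stepWins_sub (hroom : 7340032 + 368 ≤ (ue.reg .rsp).toNat) {m1 m2 : Mem}
    (hs : Mem.SameExcept (im7a_stepWins A ue) m1 m2) :
    Mem.SameExcept
      [⟨(ue.reg .rsp).toNat - 368, (ue.reg .rsp).toNat⟩,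
       ⟨inverse_mdct.buf ue, inverse_mdct.buf ue + 4 * inverse_mdct.n ue⟩,
       ⟨inverse_mdct.tmp A ue, inverse_mdct.tmp A ue + 2 * inverse_mdct.n ue⟩] m1 m2 := by
  apply hs.mono
  intro x hx a ha1 ha2
  simp only [im7a_stepWins, List.mem_cons, List.mem_nil_iff, or_false] at hx
  rcases hx with rfl | rfl | rfl | rfl | rfl | rfl
  · exact ⟨_, List.mem_cons_self, by simp only [] at ha1 ⊢; omega, by simp only [] at ha2 ⊢; omega⟩
  · exact ⟨_, List.mem_cons_self, by simp only [] at ha1 ⊢; omega, by simp only [] at ha2 ⊢; omega⟩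
  · exact ⟨_, List.mem_cons_self, by simp only [] at ha1 ⊢; omega, by simp only [] at ha2 ⊢; omega⟩
  · exact ⟨_, List.mem_cons_self, by simp only [] at ha1 ⊢; omega, by simp only [] at ha2 ⊢; omega⟩
  · exact ⟨_, List.mem_cons_of_mem _ List.mem_cons_self, ha1, ha2⟩
  · exact ⟨_, List.mem_cons_of_mem _ (List.mem_cons_of_mem _ List.mem_cons_self), ha1, ha2⟩

/-- **THE FRAME RULE OF A STEP OF SEGMENT 7**: `Frame7` at the step's exit `w` from `Frame7` at its entry `v`, when the step wrote
only the windows `im7a_stepWins` and the text, the ABI invariant, `rbp` and the steady `rsp` hold at `w`. -/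
theorem frame7_carry (hf : inverse_mdct.Frame7 u₀ others frames len A stored room ysz k c ue ret v)
    (hs : Mem.SameExcept (im7a_stepWins A ue) v.mem w.mem)
    (hcode : CodeOK u₀ w.mem) (habi : abiInv w)
    (hrbp : w.reg .rbp = ue.reg .rsp - 8) (hrsp : w.reg .rsp = ue.reg .rsp - 184) :
    inverse_mdct.Frame7 u₀ others frames len A stored room ysz k c ue ret w := by
  have hb := hf.body
  have hp := hb.pre
  have hroom := hb.entry.room
  have htop := hb.entry.top
  simp only [vspec, conv_stackLo, conv_stackHi] at hroom htop
  have keep := fun (a : Word) (d m : Nat) => slot_keep_at hp hroom htop hs a d m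
  have hb' : inverse_mdct.Body u₀ others frames len A stored room ysz k c ue ret w := by
    refine inverse_mdct.Body.carry hb (stepWins_sub hroom hs) hcode habi hrbp hrsp ?_ ?_ ?_ ?_ ?_ ?_ ?_ ?_ ?_ ?_ ?_
    · rw [keep _ 0 8 (by u_omega) (by omega) (by omega) (by omega) (by omega) (by omega)]
      exact hb.retSlot
    · rw [keep _ 8 8 (by u_omega) (by omega) (by omega) (by omega) (by omega) (by omega)]
      exact hb.rbpSlot
    · rw [keep _ 16 8 (by u_omega) (by omega) (by omega) (by omega) (by omega) (by omega)]
      exact hb.r15Slot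
    · rw [keep _ 24 8 (by u_omega) (by omega) (by omega) (by omega) (by omega) (by omega)]
      exact hb.r14Slot
    · rw [keep _ 32 8 (by u_omega) (by omega) (by omega) (by omega) (by omega) (by omega)]
      exact hb.r13Slot
    · rw [keep _ 40 8 (by u_omega) (by omega) (by omega) (by omega) (by omega) (by omega)]
      exact hb.r12Slot
    · rw [keep _ 48 8 (by u_omega) (by omega) (by omega) (by omega) (by omega) (by omega)]
      exact hb.rbxSlot
    · rw [keep _ 128 8 (by u_omega) (by omega) (by omega) (by omega) (by omega) (by omega)]
      exact hb.fSlot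
    · rw [keep _ 132 4 (by u_omega) (by omega) (by omega) (by omega) (by omega) (by omega)]
      exact hb.btSlot
    · rw [keep _ 152 4 (by u_omega) (by omega) (by omega) (by omega) (by omega) (by omega)]
      exact hb.saveSlot
    · rw [keep _ 112 8 (by u_omega) (by omega) (by omega) (by omega) (by omega) (by omega)]
      exact hb.vSlot
  refine ⟨hb', ⟨?_, ?_, ?_⟩, ?_, ?_, ⟨?_, ?_⟩, ⟨?_, ?_⟩, ?_⟩
  · rw [keep _ 64 8 (by u_omega) (by omega) (by omega) (by omega) (by omega) (by omega)]
    exact hf.sBuf.uSlot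
  · rw [keep _ 76 4 (by u_omega) (by omega) (by omega) (by omega) (by omega) (by omega)]
    exact hf.sBuf.nSlot
  · rw [keep _ 176 8 (by u_omega) (by omega) (by omega) (by omega) (by omega) (by omega)]
    exact hf.sBuf.uMidSlot
  · rw [keep _ 72 8 (by u_omega) (by omega) (by omega) (by omega) (by omega) (by omega)]
    exact hf.aSlot
  · rw [keep _ 144 8 (by u_omega) (by omega) (by omega) (by omega) (by omega) (by omega)]
    exact hf.n2x4Slot
  · rw [keep _ 160 8 (by u_omega) (by omega) (by omega) (by omega) (by omega) (by omega)]
    exact hf.sS2.n2x4m32Slot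
  · rw [keep _ 168 8 (by u_omega) (by omega) (by omega) (by omega) (by omega) (by omega)]
    exact hf.sS2.n4x4Slot
  · rw [keep _ 104 4 (by u_omega) (by omega) (by omega) (by omega) (by omega) (by omega)]
    exact hf.s3.ilogSlot
  · rw [keep _ 88 4 (by u_omega) (by omega) (by omega) (by omega) (by omega) (by omega)]
    exact hf.s3.n2m1Slot
  · rw [keep _ 136 4 (by u_omega) (by omega) (by omega) (by omega) (by omega) (by omega)]
    exact hf.n32Slot

end Carry

/-! ### Step A: the head of the second `l` loop -/

/-- **From the head of the second `l` loop** (`loop7`, 0x1098f2, line 2785): `l ≥ ld − 6`: the loop is left, imdct_step3_inner_s_loop_ld654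
is called and returns (`cut19`); `l < ld − 6`: the `l` body (0x1098fc … 0x109943: `k0`, `k1`, `k0_2`, `rlim`, `lim`, `A0`, `i_off`) runs
to the head of the `r` loop (`loop6`) with `t = 0`. -/
theorem head_step {Lay : Layout} (hLay : Lay.hi = 0x1000000) {μ : Microarch} (hμ : UserX.MicroOK μ) {u₀ : State}
    (hcode : HasCodeNat Lay u₀ Vorbis.L.inverse_mdct.entry Vorbis.Code.code_inverse_mdct.nat Vorbis.L.inverse_mdct.size)
    (h_ld : ∀ (others : List Obj) (frames : List (Nat × FrameLayout)) (len i0 : Nat), Calls Lay μ Vorbis.WayInv (Vorbis.conv u₀) Vorbis.L.imdct_step3_inner_s_loop_ld654.entry (Vorbis.Spec.imdct_step3_inner_s_loop_ld654.spec others frames len i0))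
    {others : List Obj} {frames : List (Nat × FrameLayout)} {len : Nat} {A : Arena}
    {stored room : Int} {ysz : Nat → Nat} {k c : Nat} {ue : State} {ret : Word} {l : Nat} {v : State}
    (hat : AtOuter u₀ others frames len A stored room ysz k c ue ret l v) :
    ReachVia Lay μ WayInv v (fun w => inverse_mdct.AtCut19 u₀ others frames len A stored room ysz k c ue ret w ∨
      im7a_AtInner u₀ others frames len A stored room ysz k c ue ret l 0 w) := by
  have hb := hat.frame.body
  have hp := hb.pre
  have he := hb.entry
  v_entry he
  have w_rip := hat.rip
  have c_rsp := hb.rsp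
  have c_rbp := hb.rbp
  have w_eq : Mem.EqOn Vorbis.L.textLo Vorbis.L.textHi u₀.mem v.mem := hb.code
  have hdf : v.flags .df = false := (show abiInv _ from hb.abi).1
  have hmx : v.mxcsr &&& 0x1F80 = 0x1F80 := (show abiInv _ from hb.abi).2
  have hsse := Vorbis.sseOK_of_abiInv hb.abi
  have c_rdi : v.reg .rdi = UInt64.ofNat l := by
    rw [← hat.rdi]
    exact (UInt64.ofNat_toNat).symm
  have sl_ilog := hat.frame.s3.ilogSlot
  have sl_n2m1 := hat.frame.s3.n2m1Slot
  have sl_n := hat.frame.sBuf.nSlot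
  have sl_u := hat.frame.sBuf.uSlot
  have sl_a := hat.frame.aSlot
  have sl_n32 := hat.frame.n32Slot
  have hld654 := h_ld (A.newTempObj (2 * inverse_mdct.n ue) :: others) frames (inverse_mdct.n ue / 2) (inverse_mdct.n ue / 2 - 1)
  have hk6 := hp.ld.ge
  have hk13 := hp.ld.le
  have hl7 : l ≤ 7 := by
    have := hat.hi
    have := Mdct.lmid_table hk6 hk13
    omega
  have hf := hp.isBlocksize.facts
  have hAin := hp.ok.inside _ hp.tabA_blk
  simp only [vblock] at hAin
  u_walk hcode [hμ.vendor] until [Vorbis.L.inverse_mdct.loop7, Vorbis.L.inverse_mdct.loop6] span [Vorbis.L.textLo, Vorbis.L.textHi] side (v_side)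
  case call_inv => v_inv
  case pre_10995e =>
    have hun : ShadowUntouched v.mem s_10995e.mem := by v_untouched
    have hsh := shadowPre_callee hb hun (by rw [w_rsp]; u_omega) (by rw [w_rsp]; u_omega) (by rw [w_rsp]; u_omega)
    refine imdct_step3_inner_s_loop_ld654.pre_of_call hp.isBlocksize hsh (live_buf hp _) (live_tabA hp _) ?_ ?_ ?_ ?_ ?_
    · rw [arg32_def, w_rdi, toNat_ofBV_ofNat32 _ (by omega)]
      omega
    · rw [w_rsi]
      exact (inverse_mdct.buf_def ue).symm
    · rw [arg32_def, w_rdx, toNat_ofBV_ofNat32 _ (by omega)]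
      omega
    · rw [w_rcx]
      u_omega
    · rw [arg32_def, w_r8, toNat_ofBV_ofNat32 _ (by omega)]
      omega
  · -- 0x109963 (`cut19`), the state imdct_step3_inner_s_loop_ld654 returned
    have hrdi : (s_10995e.reg .rdi).toNat % 2 ^ 32 = inverse_mdct.n ue / 32 := by
      rw [w_rdi_10995e, toNat_ofBV_ofNat32 _ (by omega)]
      omega
    have hrsi : (s_10995e.reg .rsi).toNat = inverse_mdct.buf ue := by
      rw [w_rsi_10995e]
      exact (inverse_mdct.buf_def ue).symm
    v_after_call w_rsp_10995e w_mem_10995e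
    simp only [hrdi, hrsi] at w_same
    have hndef := inverse_mdct.n_def ue
    have hs : Mem.SameExcept (im7a_stepWins A ue) v.mem s_10995er.mem := by
      simp only [im7a_stepWins]
      u_same
    refine ReachVia.done (Or.inl ⟨w_rip, ?_, w_r15⟩)
    refine frame7_carry hat.frame hs w_eq (show abiInv _ from w_inv) ?_ w_rsp
    rw [w_kept .rbp rfl]
    exact c_rbp
  · -- 0x1098eb (`loop6`), the head of the `r` loop with `t = 0`
    have hin : Mdct.InSecond k l := by
      refine ⟨hat.lo, ?_⟩
      have hnot : ¬ (k - 6 ≤ l) := fun h => hbr_1098fa ((br_outer hk6 hk13 hl7).mpr h)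
      omega
    have hsix : Six (inverse_mdct.n ue) l := Mdct.InSecond.cases hp.ld hin
    have hs : Mem.SameExcept (im7a_stepWins A ue) v.mem s_109943.mem := by
      simp only [im7a_stepWins]
      u_same
    refine ReachVia.done (Or.inr ⟨w_rip, ?_, hin, Nat.zero_le _, ?_, ?_, ?_, ?_, ?_, ?_, ?_, ?_, ?_⟩)
    · refine frame7_carry hat.frame hs w_eq (by v_inv) ?_ ?_
      · rw [w_kept .rbp rfl]
        exact c_rbp
      · rw [w_kept .rsp rfl]
        exact c_rsp
    · rw [w_rbx, val_rlim hsix]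
      omega
    · rw [w_r13]
      u_omega
    · rw [w_r12, toNat_ofBV_ofNat32 _ (by omega)]
      omega
    · rw [w_r14]
      exact val_k0 hsix
    · rw [w_r15]
      exact val_k02 hsix
    · u_resolve
      exact val_k1 hsix
    · u_resolve
      exact val_lim hsix
    · u_resolve
      exact val_l3 hsix
    · u_resolve
      exact val_l1 hsix


/-- The sizes of the second `l` loop are small. -/
theorem six_bounds {n l : Nat} (h : Six n l) :
    Mdct.rlim n l ≤ 16 ∧ Mdct.k0 n l ≤ 256 ∧ 1 ≤ Mdct.k02 n l ∧ Mdct.k02 n l ≤ 128 ∧ Mdct.k1 l ≤ 512 ∧ Mdct.lim l ≤ 128 ∧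
      l ≤ 6 := by
  rcases h with ⟨rfl, rfl⟩ | ⟨rfl, rfl⟩ | ⟨rfl, rfl⟩ | ⟨rfl, rfl⟩ | ⟨rfl, rfl⟩ | ⟨rfl, rfl⟩ <;> decide

/-- `[rsp + 8]` of the callee's entry state is the slot of `push r14`. -/
theorem addr_200 (x : Word) : x - 208 + 8 = x - 200 := by
  rw [UInt64.sub_eq_add_neg, UInt64.add_assoc, UInt64.sub_eq_add_neg]
  congr 1

/-- 0x1098d7 `shl eax, cl ; cdqe` with `eax = 4`, `cl` = the byte `l + 3`: `A0` advances by `4 k1` floats. -/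
theorem val_step {n l : Nat} (h : Six n l) :
    Word.ofBV (BitVec.signExtend 64
      (4#32 <<< ((BitVec.setWidth 8 (BitVec.zeroExtend 32 (BitVec.ofNat 8 (l + 3)))).toNat % 32))) =
      UInt64.ofNat (4 * Mdct.k1 l) := by
  rcases h with ⟨rfl, rfl⟩ | ⟨rfl, rfl⟩ | ⟨rfl, rfl⟩ | ⟨rfl, rfl⟩ | ⟨rfl, rfl⟩ | ⟨rfl, rfl⟩ <;> decide

/-- The `r` rounds shift `i_off` by `8 rlim ≤ n2 − 8` in all. -/
theorem six_span {n l : Nat} (h : Six n l) : 8 * Mdct.rlim n l + 8 ≤ n / 2 := by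
  rcases h with ⟨rfl, rfl⟩ | ⟨rfl, rfl⟩ | ⟨rfl, rfl⟩ | ⟨rfl, rfl⟩ | ⟨rfl, rfl⟩ | ⟨rfl, rfl⟩ <;> decide

/-- `sub r32, imm` of a small number that does not go below zero. -/
theorem sub32_small (x c : Nat) (hc : c ≤ x) (hx : x < 2 ^ 31) :
    (Word.ofBV (Word.part Width.w32 (UInt64.ofNat x) - BitVec.ofNat 32 c)).toNat = x - c := by
  rw [toNat_ofBV32, BitVec.toNat_sub, (part32_small x hx).1, BitVec.toNat_ofNat]
  have e : c % 2 ^ 32 = c := Nat.mod_eq_of_lt (by omega)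
  rw [e]
  omega

section Carry2
variable {u₀ : State} {others : List Obj} {frames : List (Nat × FrameLayout)} {len : Nat} {A : Arena}
  {stored room : Int} {ysz : Nat → Nat} {k c : Nat} {ue : State} {ret : Word} {v w : State}

/-- The windows a round of the `r` loop writes: the stack below the steady rsp, the sample buffer, the temp block. -/
def callWins (A : Arena) (ue : State) : List Span :=
  [⟨(ue.reg .rsp).toNat - 368, (ue.reg .rsp).toNat - 184⟩,
   ⟨inverse_mdct.buf ue, inverse_mdct.buf ue + 4 * inverse_mdct.n ue⟩,
   ⟨inverse_mdct.tmp A ue, inverse_mdct.tmp A ue + 2 * inverse_mdct.n ue⟩]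

/-- A round of the `r` loop is a step of segment 7. -/
theorem callWins_sub {m1 m2 : Mem} (hs : Mem.SameExcept (callWins A ue) m1 m2) : Mem.SameExcept (im7a_stepWins A ue) m1 m2 := by
  apply hs.mono
  intro x hx a ha1 ha2
  simp only [callWins, List.mem_cons, List.mem_nil_iff, or_false] at hx
  simp only [im7a_stepWins]
  rcases hx with rfl | rfl | rfl
  · exact ⟨_, List.mem_cons_self, ha1, ha2⟩
  · exact ⟨_, List.mem_cons_of_mem _ (List.mem_cons_of_mem _ (List.mem_cons_of_mem _ (List.mem_cons_of_mem _
      List.mem_cons_self))), ha1, ha2⟩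
  · exact ⟨_, List.mem_cons_of_mem _ (List.mem_cons_of_mem _ (List.mem_cons_of_mem _ (List.mem_cons_of_mem _
      (List.mem_cons_of_mem _ List.mem_cons_self)))), ha1, ha2⟩

/-- **Every slot of the frame above the steady rsp reads as before a round of the `r` loop**: `[rsp − d, rsp − d + m)`. -/
theorem slot_keep_call (hp : inverse_mdct.Pre others frames len A stored room ysz k c ue)
    (hroom : 7340032 + 368 ≤ (ue.reg .rsp).toNat) (htop : (ue.reg .rsp).toNat + 8 ≤ 8388608)
    {m1 m2 : Mem} (hs : Mem.SameExcept (callWins A ue) m1 m2) (a : Word) (d m : Nat)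
    (ha : a.toNat = (ue.reg .rsp).toNat - d) (hd : d ≤ 184) (hm : m ≤ d + 8) :
    m2.readLE a m = m1.readLE a m := by
  have hd := data_off_stack hp
  apply hs.readLE a m (by omega)
  intro x hx
  simp only [callWins, List.mem_cons, List.mem_nil_iff, or_false] at hx
  rcases hx with rfl | rfl | rfl <;> simp only [] <;> omega

end Carry2

/-! ### Step B: one round of the `r` loop -/

/-- **From the head of the `r` loop** (`loop6`, 0x1098eb, line 2792) after `t` rounds: `r = 0` (`t = rlim`): `mov edi, [rbp-0x70]` and
the head of the `l` loop with `l + 1`; `r > 0` (`t < rlim`): the call of imdct_step3_inner_s_loop (0x1098ad … 0x1098c9, the seventh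
argument pushed), `A0 += 4 k1`, `i_off -= 8`, `--r`, `add rsp, 10H`, and the head again with `t + 1`. -/
theorem inner_step {Lay : Layout} (hLay : Lay.hi = 0x1000000) {μ : Microarch} (hμ : UserX.MicroOK μ) {u₀ : State}
    (hcode : HasCodeNat Lay u₀ Vorbis.L.inverse_mdct.entry Vorbis.Code.code_inverse_mdct.nat Vorbis.L.inverse_mdct.size)
    (h_s : ∀ (others : List Obj) (frames : List (Nat × FrameLayout)) (len i0 koff k0 aoff : Nat), Calls Lay μ Vorbis.WayInv (Vorbis.conv u₀) Vorbis.L.imdct_step3_inner_s_loop.entry (Vorbis.Spec.imdct_step3_inner_s_loop.spec others frames len i0 koff k0 aoff))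
    {others : List Obj} {frames : List (Nat × FrameLayout)} {len : Nat} {A : Arena}
    {stored room : Int} {ysz : Nat → Nat} {k c : Nat} {ue : State} {ret : Word} {l t : Nat} {v : State}
    (hat : im7a_AtInner u₀ others frames len A stored room ysz k c ue ret l t v) :
    ReachVia Lay μ WayInv v (fun w => AtOuter u₀ others frames len A stored room ysz k c ue ret (l + 1) w ∨
      (im7a_AtInner u₀ others frames len A stored room ysz k c ue ret l (t + 1) w ∧ t < Mdct.rlim (inverse_mdct.n ue) l)) := by
  have hb := hat.frame.body
  have hp := hb.pre
  have he := hb.entry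
  v_entry he
  have w_rip := hat.rip
  have c_rsp := hb.rsp
  have c_rbp := hb.rbp
  have w_eq : Mem.EqOn Vorbis.L.textLo Vorbis.L.textHi u₀.mem v.mem := hb.code
  have hdf : v.flags .df = false := (show abiInv _ from hb.abi).1
  have hmx : v.mxcsr &&& 0x1F80 = 0x1F80 := (show abiInv _ from hb.abi).2
  have hsse := Vorbis.sseOK_of_abiInv hb.abi
  have hsix : Six (inverse_mdct.n ue) l := Mdct.InSecond.cases hp.ld hat.inl
  have hc := Mdct.Call.secondL hp.ld hat.inl
  have hf := hp.isBlocksize.facts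
  have hAin := hp.ok.inside _ hp.tabA_blk
  simp only [vblock] at hAin
  obtain ⟨hb_rlim, hb_k0, hb_k02lo, hb_k02, hb_k1, hb_lim, hb_l⟩ := six_bounds hsix
  have hle := hat.le
  have hkt : 4 * Mdct.k1 l * t ≤ inverse_mdct.n ue / 2 := by
    rw [← hc.A_span]
    exact Nat.mul_le_mul_left _ hle
  have c_rbx : v.reg .rbx = UInt64.ofNat (Mdct.rlim (inverse_mdct.n ue) l - t) := by
    rw [← hat.rbx]
    exact (UInt64.ofNat_toNat).symm
  have c_r13 : v.reg .r13 = UInt64.ofNat (inverse_mdct.tabA ue + 4 * (4 * Mdct.k1 l * t)) := by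
    rw [← hat.r13]
    exact (UInt64.ofNat_toNat).symm
  have c_r12 : v.reg .r12 = UInt64.ofNat (inverse_mdct.n ue / 2 - 1 - 8 * t) := by
    rw [← hat.r12]
    exact (UInt64.ofNat_toNat).symm
  have c_r14 : v.reg .r14 = UInt64.ofNat (Mdct.k0 (inverse_mdct.n ue) l) := by
    rw [← hat.r14]
    exact (UInt64.ofNat_toNat).symm
  have c_r15 : v.reg .r15 = UInt64.ofNat (Mdct.k02 (inverse_mdct.n ue) l) := by
    rw [← hat.r15]
    exact (UInt64.ofNat_toNat).symm
  have sl_u := hat.frame.sBuf.uSlot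
  have sl_k1 := hat.k1Slot
  have sl_lim := hat.limSlot
  have sl_l3 := hat.l3Slot
  have sl_l1 := hat.l1Slot
  have hsl := h_s (A.newTempObj (2 * inverse_mdct.n ue) :: others) frames (inverse_mdct.n ue / 2)
    (inverse_mdct.n ue / 2 - 1 - 8 * t) (Mdct.k02 (inverse_mdct.n ue) l) (Mdct.k0 (inverse_mdct.n ue) l) (Mdct.k1 l)
  u_walk hcode [hμ.vendor] until [Vorbis.L.inverse_mdct.loop7, Vorbis.L.inverse_mdct.loop6] span [Vorbis.L.textLo, Vorbis.L.textHi] side (v_side)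
  case call_inv => v_inv
  case pre_1098c9 =>
    have hx := part32_small (Mdct.rlim (inverse_mdct.n ue) l - t) (by omega)
    have ht : t < Mdct.rlim (inverse_mdct.n ue) l := by
      have := hbr_1098ed.1
      rw [hx.1] at this
      omega
    have hct := Mdct.Call.secondL_call hp.ld hat.inl ht
    have hun : ShadowUntouched v.mem s_1098c9.mem := by v_untouched
    have hsh := shadowPre_callee hb hun (by rw [w_rsp]; u_omega) (by rw [w_rsp]; u_omega) (by rw [w_rsp]; u_omega)
    refine imdct_step3_inner_s_loop.pre_of_call hp.ld hat.inl ht hsh (live_buf hp _) (live_tabA hp _) rfl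
      ?_ ?_ ?_ ?_ ?_ ?_ ?_
    · rw [arg32_def, w_rdi, toNat_ofBV_ofNat32 _ (by omega)]
      omega
    · rw [w_rsi]
      exact (inverse_mdct.buf_def ue).symm
    · rw [arg32_def, w_rdx, toNat_ofBV32, (part32_small _ (by omega)).1]
      omega
    · refine ⟨by omega, by omega, ?_⟩
      rw [arg32_def, w_rcx, toNat_ofBV32, BitVec.toNat_neg, (part32_small _ (by omega)).1]
      omega
    · rw [w_r8]
      u_omega
    · rw [arg32_def, w_r9, toNat_ofBV_ofNat32 _ (by omega)]
      omega
    · have e0 : (UInt64.ofNat (Mdct.k0 (inverse_mdct.n ue) l)).toNat = Mdct.k0 (inverse_mdct.n ue) l := by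
        rw [UInt64.toNat_ofNat']
        omega
      rw [w_rsp, w_mem, addr_200, e0]
      rw [Mem.readLE_writeLE_disjoint_noWrap _ _ _ _ _ _ ?_ ?_ ?_]
      · exact readLE4_writeLE8 _ _ (Mdct.k0 (inverse_mdct.n ue) l) (by omega)
      · u_frame_side
      · u_frame_side
      · u_frame_side
  · -- 0x1098ce (`cut16`), the state imdct_step3_inner_s_loop returned
    have hx := part32_small (Mdct.rlim (inverse_mdct.n ue) l - t) (by omega)
    have ht : t < Mdct.rlim (inverse_mdct.n ue) l := by
      have := hbr_1098ed.1
      rw [hx.1] at this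
      omega
    have hct := Mdct.Call.secondL_call hp.ld hat.inl ht
    have hrdi : (s_1098c9.reg .rdi).toNat % 2 ^ 32 = Mdct.lim l := by
      rw [w_rdi_1098c9, toNat_ofBV_ofNat32 _ (by omega)]
      omega
    have hrsi : (s_1098c9.reg .rsi).toNat = inverse_mdct.buf ue := by
      rw [w_rsi_1098c9]
      exact (inverse_mdct.buf_def ue).symm
    v_after_call w_rsp_1098c9 w_mem_1098c9
    simp only [hrdi, hrsi] at w_same
    have hndef := inverse_mdct.n_def ue
    have hs : Mem.SameExcept (callWins A ue) v.mem s_1098c9r.mem := by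
      simp only [callWins]
      u_same
    have hroom := he_room
    have htop := he_top
    have sl_b : s_1098c9r.mem.readLE (ue.reg .rsp - 80) 1 = l + 3 := by
      rw [slot_keep_call hp hroom htop hs _ 80 1 (by u_omega) (by omega) (by omega)]
      exact readLE1_of_readLE4 _ _ _ sl_l3 (by omega)
    clear w_same
    u_walk hcode [hμ.vendor] until [Vorbis.L.inverse_mdct.loop7, Vorbis.L.inverse_mdct.loop6] span [Vorbis.L.textLo, Vorbis.L.textHi] side (v_side)
    -- 0x1098eb (`loop6`) again, after `A0 += 4 k1`, `i_off -= 8`, `--r`, `add rsp, 10H`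
    have hspan := six_span hsix
    have hs' : Mem.SameExcept (callWins A ue) v.mem s_1098e7.mem := by
      rw [w_mem]
      exact hs
    refine ReachVia.done (Or.inr ⟨⟨w_rip, ?_, hat.inl, by omega, ?_, ?_, ?_, ?_, ?_, ?_, ?_, ?_, ?_⟩, ht⟩)
    · refine frame7_carry hat.frame (callWins_sub hs') w_eq (by v_inv) ?_ w_rsp
      rw [w_kept .rbp rfl]
      exact c_rbp
    · rw [w_rbx, sub32_small _ 1 (by omega) (by omega)]
      omega
    · have e : 4 * Mdct.k1 l * (t + 1) = 4 * Mdct.k1 l * t + 4 * Mdct.k1 l := Nat.mul_succ _ _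
      rw [w_r13, val_step hsix, e]
      u_omega
    · rw [w_r12, sub32_small _ 8 (by omega) (by omega)]
      omega
    · rw [w_kept .r14 rfl]
      exact hat.r14
    · rw [w_kept .r15 rfl]
      exact hat.r15
    · rw [slot_keep_call hp hroom htop hs' _ 96 4 (by u_omega) (by omega) (by omega)]
      exact sl_k1
    · rw [slot_keep_call hp hroom htop hs' _ 100 4 (by u_omega) (by omega) (by omega)]
      exact sl_lim
    · rw [slot_keep_call hp hroom htop hs' _ 80 4 (by u_omega) (by omega) (by omega)]
      exact sl_l3
    · rw [slot_keep_call hp hroom htop hs' _ 120 4 (by u_omega) (by omega) (by omega)]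
      exact sl_l1
  · -- 0x1098f2 (`loop7`): `r = 0`, the `r` loop is left with `edi = l + 1`
    have hx := part32_small (Mdct.rlim (inverse_mdct.n ue) l - t) (by omega)
    refine ReachVia.done (Or.inl ⟨w_rip, ?_, ?_, ?_, ?_⟩)
    · refine frame7_carry hat.frame ?_ w_eq (by v_inv) ?_ ?_
      · rw [w_mem]
        exact Mem.SameExcept.refl _ _
      · rw [w_kept .rbp rfl]
        exact c_rbp
      · rw [w_kept .rsp rfl]
        exact c_rsp
    · rw [w_rdi, toNat_ofBV_ofNat32 _ (by omega)]
    · have := hat.inl.1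
      omega
    · have := hat.inl.2
      omega


/-! ### The two loops, from the steps -/

section Loops
variable {Lay : Layout} {μ : Microarch} {u₀ : State}
  {others : List Obj} {frames : List (Nat × FrameLayout)} {len : Nat} {A : Arena}
  {stored room : Int} {ysz : Nat → Nat} {k c : Nat} {ue : State} {ret : Word}

/-- **The `r` loop** (line 2792): from its head after any number of rounds to the head of the `l` loop with `l + 1`. Measure: `ebx`. -/
theorem inner_loop (hLay : Lay.hi = 0x1000000) (hμ : UserX.MicroOK μ)
    (hcode : HasCodeNat Lay u₀ Vorbis.L.inverse_mdct.entry Vorbis.Code.code_inverse_mdct.nat Vorbis.L.inverse_mdct.size)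
    (h_s : ∀ (others : List Obj) (frames : List (Nat × FrameLayout)) (len i0 koff k0 aoff : Nat), Calls Lay μ Vorbis.WayInv (Vorbis.conv u₀) Vorbis.L.imdct_step3_inner_s_loop.entry (Vorbis.Spec.imdct_step3_inner_s_loop.spec others frames len i0 koff k0 aoff))
    (l : Nat) (v : State) (hv : ∃ t, im7a_AtInner u₀ others frames len A stored room ysz k c ue ret l t v) :
    ReachVia Lay μ WayInv v (fun w => AtOuter u₀ others frames len A stored room ysz k c ue ret (l + 1) w ∧
      Mdct.InSecond k l) := by
  refine ReachVia.loop (Inv := fun v => ∃ t, im7a_AtInner u₀ others frames len A stored room ysz k c ue ret l t v)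
    (fun v => (v.reg .rbx).toNat) ?_ v hv
  intro v hinv
  obtain ⟨t, hat⟩ := hinv
  refine (inner_step hLay hμ hcode h_s hat).mono ?_
  intro w hw
  rcases hw with ho | ⟨hi, ht⟩
  · exact Or.inl ⟨ho, hat.inl⟩
  · refine Or.inr ⟨⟨t + 1, hi⟩, ?_⟩
    show (w.reg .rbx).toNat < (v.reg .rbx).toNat
    rw [hi.rbx, hat.rbx]
    omega

/-- **The second `l` loop** (line 2785): from its head to the state imdct_step3_inner_s_loop_ld654 returned (`cut19`). Measure:
`ld − 6 − l`. -/
theorem outer_loop (hLay : Lay.hi = 0x1000000) (hμ : UserX.MicroOK μ)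
    (hcode : HasCodeNat Lay u₀ Vorbis.L.inverse_mdct.entry Vorbis.Code.code_inverse_mdct.nat Vorbis.L.inverse_mdct.size)
    (h_s : ∀ (others : List Obj) (frames : List (Nat × FrameLayout)) (len i0 koff k0 aoff : Nat), Calls Lay μ Vorbis.WayInv (Vorbis.conv u₀) Vorbis.L.imdct_step3_inner_s_loop.entry (Vorbis.Spec.imdct_step3_inner_s_loop.spec others frames len i0 koff k0 aoff))
    (h_ld : ∀ (others : List Obj) (frames : List (Nat × FrameLayout)) (len i0 : Nat), Calls Lay μ Vorbis.WayInv (Vorbis.conv u₀) Vorbis.L.imdct_step3_inner_s_loop_ld654.entry (Vorbis.Spec.imdct_step3_inner_s_loop_ld654.spec others frames len i0))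
    (v : State) (hv : ∃ l, AtOuter u₀ others frames len A stored room ysz k c ue ret l v) :
    ReachVia Lay μ WayInv v (fun w => inverse_mdct.AtCut19 u₀ others frames len A stored room ysz k c ue ret w) := by
  refine ReachVia.loop (Inv := fun v => ∃ l, AtOuter u₀ others frames len A stored room ysz k c ue ret l v)
    (fun v => k - 6 - (v.reg .rdi).toNat) ?_ v hv
  intro v hinv
  obtain ⟨l, hat⟩ := hinv
  refine (head_step hLay hμ hcode h_ld hat).trans ?_
  intro w hw
  rcases hw with hc | hi
  · exact ReachVia.done (Or.inl hc)
  · refine (inner_loop hLay hμ hcode h_s l w ⟨0, hi⟩).mono ?_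
    intro w' hw'
    obtain ⟨ho, hin⟩ := hw'
    refine Or.inr ⟨⟨l + 1, ho⟩, ?_⟩
    show k - 6 - (w'.reg .rdi).toNat < k - 6 - (v.reg .rdi).toNat
    rw [ho.rdi, hat.rdi]
    have := hin.2
    omega

end Loops


end Vorbis.Spec.inverse_mdct_7a
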